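-- pv_equiv track=rewrite | github.com/itbc-bin/owe2a-afvinkopdracht1-SanneSchroduer | Afvink1.py | is_dna
-- ===== SOURCE A (Python) =====
-- def is_dna(seqs):
--
--     DNA_check = False
--     for seq in seqs:
--         A = seq.count("A")
--         T = seq.count("T")
--         C = seq.count("C")
--         G = seq.count("G")
--
--         dna = A + T + C + G
--
--         if dna == len(seq):
--             DNA_check = True
--        # else:
--            # raise TypeError
--
--     return DNA_check
-- ===== SOURCE B (Python) =====
-- def is_dna(seqs):
--     # Delete every valid base from the string; it was pure DNA iff nothing is left.
--     delete_bases = str.maketrans('', '', 'ATCG')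
--     for seq in seqs:
--         if seq.translate(delete_bases) == '':
--             return True
--     return False
-- ===== Notes on version B (the rewrite author's own statement) =====
-- stated objective: idiomatic
-- what changed: A takes four .count scans per string, sums them, compares to len(seq) and flips an accumulator flag over the whole list; B deletes the valid bases from each string with one str.translate pass and tests the residue for emptiness, returning early at the first all-DNA string instead of scanning every string.
import Mathlib
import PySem

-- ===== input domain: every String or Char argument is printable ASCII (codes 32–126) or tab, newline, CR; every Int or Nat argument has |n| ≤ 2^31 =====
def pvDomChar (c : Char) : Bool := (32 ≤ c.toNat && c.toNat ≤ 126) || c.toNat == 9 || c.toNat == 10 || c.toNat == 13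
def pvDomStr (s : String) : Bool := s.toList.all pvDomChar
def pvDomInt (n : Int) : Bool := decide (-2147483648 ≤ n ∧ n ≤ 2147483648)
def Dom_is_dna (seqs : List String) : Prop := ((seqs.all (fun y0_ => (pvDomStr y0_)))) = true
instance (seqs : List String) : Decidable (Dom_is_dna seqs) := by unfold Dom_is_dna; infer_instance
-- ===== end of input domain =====

-- B replaces A's four per-string .count passes + arithmetic + accumulator flag by a single
-- str.translate deletion of the valid bases with an emptiness test and an early return
-- (objective: idiomatic).

-- ===== PORT A =====
def is_dna (seqs : List String) : Bool :=
  seqs.foldl (fun DNA_check seq =>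
    let A : Int := PySem.Str.count seq "A"
    let T : Int := PySem.Str.count seq "T"
    let C : Int := PySem.Str.count seq "C"
    let G : Int := PySem.Str.count seq "G"
    let dna := A + T + C + G
    if dna == PySem.Str.len seq then true else DNA_check) false

-- ===== PORT B =====
-- seq.translate(str.maketrans('', '', 'ATCG')) deletes every occurrence of A/T/C/G;
-- ported by hand as a filter dropping those chars (exact: the table only deletes).
def is_dna_alt : List String → Bool
  | [] => false
  | seq :: rest =>
    if (seq.toList.filter (fun c => !("ATCG".toList.contains c))).isEmpty then true
    else is_dna_alt rest

-- ===== PRECONDITION & SPEC =====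
def Spec_is_dna (seqs : List String) (out : Bool) : Prop := out = is_dna_alt seqs
instance (seqs : List String) (out : Bool) : Decidable (Spec_is_dna seqs out) := by unfold Spec_is_dna; infer_instance

-- ===== CLAIM (what is proved, stated in full; the proofs are below) =====
def Claim_equal_is_dna : Prop := ∀ (seqs : List String), Dom_is_dna seqs → Spec_is_dna seqs (is_dna seqs)

-- ===== LEMMAS AND PROOFS =====

-- single-character substring count equals the element count
theorem count_go_single (c : Char) : ∀ (cs : List Char) (fuel acc : Nat), cs.length ≤ fuel →
    PySem.Chars.count.go [c] fuel cs acc = acc + cs.count c := by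
  intro cs
  induction cs with
  | nil => intro fuel acc _; cases fuel <;> simp [PySem.Chars.count.go]
  | cons h t ih =>
    intro fuel acc hle
    cases fuel with
    | zero => simp at hle
    | succ f =>
      rw [PySem.Chars.count.go]
      simp only [List.isPrefixOf, List.count_cons]
      by_cases hc : c = h
      · subst hc
        simp only [BEq.rfl, Bool.true_and, if_true]
        rw [List.length_cons] at hle
        rw [show ([c].length = 1) from rfl, List.drop_one, List.tail_cons,
            ih f (acc + 1) (by omega)]
        omega
      · have : (c == h) = false := by simp [hc]
        simp only [this, Bool.false_and]
        rw [if_neg (by simp)]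
        rw [List.length_cons] at hle
        rw [ih f acc (by omega)]
        have : (h == c) = false := by simp [Ne.symm hc]
        simp [this]

theorem count_single (cs : List Char) (c : Char) :
    PySem.Chars.count cs [c] = cs.count c := by
  rw [PySem.Chars.count]
  simp only [List.isEmpty_cons, if_false, Bool.false_eq_true]
  simpa using count_go_single c cs cs.length 0 le_rfl

theorem sum_counts (cs : List Char) :
    cs.count 'A' + cs.count 'T' + cs.count 'C' + cs.count 'G'
      = cs.countP (fun c => decide (c ∈ (['A','T','C','G'] : List Char))) := by
  induction cs with
  | nil => rfl
  | cons h t ih =>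
    simp only [List.count_cons, List.countP_cons, List.mem_cons, List.not_mem_nil, or_false]
    split_ifs <;> simp_all <;> omega

-- A's per-string count test agrees with B's deletion-residue emptiness test
theorem string_cond (s : String) :
    (((PySem.Str.count s "A" : Int) + PySem.Str.count s "T" + PySem.Str.count s "C"
        + PySem.Str.count s "G") == PySem.Str.len s)
      = (s.toList.filter (fun c => !("ATCG".toList.contains c))).isEmpty := by
  rw [Bool.eq_iff_iff]
  have hA : ("A" : String).toList = ['A'] := by decide
  have hT : ("T" : String).toList = ['T'] := by decide
  have hC : ("C" : String).toList = ['C'] := by decide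
  have hG : ("G" : String).toList = ['G'] := by decide
  have hB : ("ATCG" : String).toList = ['A','T','C','G'] := by decide
  simp only [PySem.Str.count_eq, hA, hT, hC, hG, hB, count_single, beq_iff_eq,
    List.isEmpty_iff, List.filter_eq_nil_iff, Bool.not_eq_true', List.contains_eq_mem,
    decide_eq_false_iff_not]
  rw [show PySem.Str.len s = (s.toList.length : Int) from by simp [PySem.Str.len_eq]]
  have hcnt := sum_counts s.toList
  constructor
  · intro h c hc
    have hlen : s.toList.countP (fun c => decide (c ∈ (['A','T','C','G'] : List Char)))
        = s.toList.length := by omega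
    exact not_not_intro (of_decide_eq_true (List.countP_eq_length.mp hlen c hc))
  · intro h
    have hlen : s.toList.countP (fun c => decide (c ∈ (['A','T','C','G'] : List Char)))
        = s.toList.length :=
      List.countP_eq_length.mpr (fun c hc => decide_eq_true (not_not.mp (h c hc)))
    omega

-- A's flag-flipping foldl equals an 'any' of the same test
theorem foldl_or_any (p : String → Bool) (l : List String) (b : Bool) :
    l.foldl (fun acc s => if p s then true else acc) b = (b || l.any p) := by
  induction l generalizing b with
  | nil => simp
  | cons h t ih =>
    simp only [List.foldl_cons, List.any_cons, ih]
    cases p h <;> simp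

-- B's early-return recursion equals an 'any' of its test
theorem alt_eq_any (l : List String) :
    is_dna_alt l = l.any (fun s => (s.toList.filter (fun c => !("ATCG".toList.contains c))).isEmpty) := by
  induction l with
  | nil => rfl
  | cons h t ih =>
    rw [is_dna_alt, List.any_cons, ih]
    cases hp : (h.toList.filter (fun c => !("ATCG".toList.contains c))).isEmpty <;> simp

-- ===== VERDICT (by name: the statement is the Claim_ definition above) =====
theorem is_dna_spec : Claim_equal_is_dna := by
  intro seqs _
  unfold Spec_is_dna is_dna
  rw [alt_eq_any,
    foldl_or_any (fun seq => ((PySem.Str.count seq "A" : Int) + PySem.Str.count seq "T"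
      + PySem.Str.count seq "C" + PySem.Str.count seq "G") == PySem.Str.len seq)]
  simp only [Bool.false_or]
  congr 1
  funext s
  exact string_cond s
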